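-- pv_equiv track=rewrite | github.com/Frisked96/ed | p.py | shift_map
-- ===== SOURCE A (Python) =====
-- def shift_map(map_data, dx, dy):
--     height = len(map_data)
--     width = len(map_data[0])
--     new_map = [['' for _ in range(width)] for _ in range(height)]
--     for y in range(height):
--         for x in range(width):
--             new_map[(y + dy) % height][(x + dx) % width] = map_data[y][x]
--     return new_map
-- ===== SOURCE B (Python) =====
-- def shift_map(map_data, dx, dy):
--     height = len(map_data)
--     width = len(map_data[0])
--     dy %= height
--     k = dx % width if width else 0
--     return [src[width - k:] + src[:width - k]
--             for y in range(height)
--             for src in [map_data[(y - dy) % height][:width]]]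
-- ===== Notes on version B (the rewrite author's own statement) =====
-- stated objective: alternative
-- what changed: Replaced the per-cell scatter into a pre-initialized grid by a per-row gather: offsets are reduced mod height/width once and each output row is built by slice rotation (with nonnegative split point width-k) of the corresponding source row.
import Mathlib
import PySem

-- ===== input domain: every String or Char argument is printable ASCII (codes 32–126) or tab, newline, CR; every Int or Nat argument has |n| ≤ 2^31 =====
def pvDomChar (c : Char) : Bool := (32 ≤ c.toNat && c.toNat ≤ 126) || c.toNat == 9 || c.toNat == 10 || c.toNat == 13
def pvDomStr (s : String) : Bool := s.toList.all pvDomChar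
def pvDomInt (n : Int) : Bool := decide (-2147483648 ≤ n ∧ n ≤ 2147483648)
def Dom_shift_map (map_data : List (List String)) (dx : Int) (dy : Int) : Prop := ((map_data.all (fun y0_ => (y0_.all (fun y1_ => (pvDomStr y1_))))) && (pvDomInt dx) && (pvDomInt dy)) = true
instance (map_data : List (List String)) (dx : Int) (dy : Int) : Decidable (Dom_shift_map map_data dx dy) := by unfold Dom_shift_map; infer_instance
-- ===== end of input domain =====

-- B rebuilds each output row by slice rotation of its source row (per-row gather);
-- A scatters every cell into a pre-initialized grid (per-cell writes).  Same cost, different decomposition.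

-- ===== PORT A =====
-- literal port of A: nested loops writing map_data[y][x] into new_map[(y+dy)%h][(x+dx)%w].
-- map_data[0] raises IndexError on [] in Python: the [] branch is a totality guard, excluded by Pre_.
-- reads map_data[y][x] (IndexError on short rows in Python) are ported with getD; excluded by Pre_.
def shift_map (map_data : List (List String)) (dx : Int) (dy : Int) : List (List String) :=
  match map_data with
  | [] => []
  | row0 :: _ =>
    let height : Nat := map_data.length
    let width : Nat := row0.length
    (List.range height).foldl (fun nm (y : Nat) =>
      (List.range width).foldl (fun nm2 (x : Nat) =>
        let r := (PySem.Int.mod ((y : Int) + dy) (height : Int)).toNat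
        let c := (PySem.Int.mod ((x : Int) + dx) (width : Int)).toNat
        nm2.set r ((nm2.getD r []).set c ((map_data.getD y []).getD x ""))) nm)
      (List.replicate height (List.replicate width ""))

-- ===== PORT B =====
-- literal port of Source B.  map_data[0] on [] raises IndexError in Python: the [] branch
-- is a totality guard, excluded by Pre_.  'k = dx % width if width else 0' is the
-- if-expression of Source B.
def shift_map_alt (map_data : List (List String)) (dx : Int) (dy : Int) : List (List String) :=
  match map_data with
  | [] => []
  | row0 :: _ =>
    let height : Int := (map_data.length : Int)
    let width : Int := (row0.length : Int)
    let dy' := PySem.Int.mod dy height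
    let k : Int := if width = 0 then 0 else PySem.Int.mod dx width
    (List.range map_data.length).map (fun (y : Nat) =>
      let src := PySem.List.slice (map_data.getD (PySem.Int.mod ((y : Int) - dy') height).toNat []) none (some width)
      PySem.List.slice src (some (width - k)) none ++ PySem.List.slice src none (some (width - k)))

-- ===== PRECONDITION & SPEC =====
-- Pre_ admits exactly the inputs on which Python A returns: a non-empty map whose every
-- row is at least as long as the first row.  Everything excluded makes A RAISE
-- (IndexError on [] at map_data[0], or IndexError reading a row shorter than row 0).
def Pre_shift_map (map_data : List (List String)) (dx : Int) (dy : Int) : Prop :=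
  map_data ≠ [] ∧ ∀ row ∈ map_data, (map_data.headD []).length ≤ row.length
instance (map_data : List (List String)) (dx : Int) (dy : Int) : Decidable (Pre_shift_map map_data dx dy) := by unfold Pre_shift_map; infer_instance

def pvWitness_shift_map : List (List String) × Int × Int := ([["a", "b"], ["c", "d"]], 1, 1)

def Spec_shift_map (map_data : List (List String)) (dx : Int) (dy : Int) (out : List (List String)) : Prop := out = shift_map_alt map_data dx dy
instance (map_data : List (List String)) (dx : Int) (dy : Int) (out : List (List String)) : Decidable (Spec_shift_map map_data dx dy out) := by unfold Spec_shift_map; infer_instance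

-- ===== CLAIM (what is proved, stated in full; the proofs are below) =====
def Claim_equal_shift_map : Prop := ∀ (map_data : List (List String)) (dx : Int) (dy : Int), Dom_shift_map map_data dx dy → Pre_shift_map map_data dx dy → Spec_shift_map map_data dx dy (shift_map map_data dx dy)

-- ===== LEMMAS AND PROOFS =====

-- foldl congruence under an invariant
theorem pv_foldl_congr_inv {α β : Type} (P : α → Prop) (f g : α → β → α)
    (hP : ∀ a b, P a → P (g a b)) (hfg : ∀ a b, P a → f a b = g a b) :
    ∀ (xs : List β) (a : α), P a → xs.foldl f a = xs.foldl g a := by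
  intro xs
  induction xs with
  | nil => intro a _; rfl
  | cons x xs ih =>
    intro a ha
    simp only [List.foldl_cons, hfg a x ha]
    exact ih (g a x) (hP a x ha)

-- a fold that only rewrites entry r equals a single set of that entry
theorem pv_foldl_set_row {α β : Type} (g : α → β → α) (r : Nat) (dflt : α) :
    ∀ (xs : List β) (acc : List α), r < acc.length →
      xs.foldl (fun a x => a.set r (g (a.getD r dflt) x)) acc
        = acc.set r (xs.foldl g (acc.getD r dflt)) := by
  intro xs
  induction xs with
  | nil =>
    intro acc hr
    simp [List.getElem?_eq_getElem hr, List.set_getElem_self]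
  | cons x xs ih =>
    intro acc hr
    simp only [List.foldl_cons]
    rw [ih _ (by simpa using hr)]
    simp [hr, List.set_set, List.getElem_set_self]

theorem pv_mod_shift_back (k d h : Int) (h0 : 0 ≤ k) (h1 : k < h) :
    ((k + d) % h - d) % h = k := by
  rw [Int.sub_emod, Int.emod_emod_of_dvd _ dvd_rfl, ← Int.sub_emod,
    add_sub_cancel_right, Int.emod_eq_of_lt h0 h1]

theorem pv_mod_inj (r d h : Int) (hr0 : 0 ≤ r) (hr : r < h) :
    ((r - d) % h + d) % h = r := by
  rw [Int.add_emod, Int.emod_emod_of_dvd _ dvd_rfl, ← Int.add_emod,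
    sub_add_cancel, Int.emod_eq_of_lt hr0 hr]

theorem pv_mod_sub_mod (a b n : Int) : (a - b % n) % n = (a - b) % n := by
  rw [Int.sub_emod, Int.emod_emod_of_dvd _ dvd_rfl, ← Int.sub_emod]

-- the scatter fold over targets (y+d) % h fills a fresh array as a gather
theorem pv_scatter {α : Type} (h : Nat) (hpos : 0 < h) (d : Int) (dflt e : α)
    (F : α → Nat → α) (k : Nat) (hk : k ≤ h) :
    (List.range k).foldl (fun acc y =>
        acc.set (((y : Int) + d) % (h : Int)).toNat
          (F (acc.getD (((y : Int) + d) % (h : Int)).toNat e) y))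
      (List.replicate h dflt)
    = (List.range h).map (fun (r : Nat) =>
        if (((r : Int) - d) % (h : Int)).toNat < k
        then F dflt (((r : Int) - d) % (h : Int)).toNat else dflt) := by
  have hposZ : (0 : Int) < (h : Int) := by exact_mod_cast hpos
  induction k with
  | zero =>
    apply List.ext_getElem
    · simp
    · intro r h1 h2
      simp
  | succ k ih =>
    have hkh : k < h := hk
    have h0 : 0 ≤ ((k : Int) + d) % (h : Int) := Int.emod_nonneg _ (by omega)
    have h1 : ((k : Int) + d) % (h : Int) < (h : Int) := Int.emod_lt_of_pos _ hposZ
    rw [List.range_succ, List.foldl_append, ih (le_of_lt hkh)]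
    simp only [List.foldl_cons, List.foldl_nil]
    have htkZ : ((((k : Int) + d) % (h : Int)).toNat : Int) = ((k : Int) + d) % (h : Int) :=
      Int.toNat_of_nonneg h0
    have htkh : (((k : Int) + d) % (h : Int)).toNat < h := by omega
    have hback : ((((((k : Int) + d) % (h : Int)).toNat : Int)) - d) % (h : Int) = (k : Int) := by
      rw [htkZ]
      exact pv_mod_shift_back _ _ _ (by omega) (by exact_mod_cast hkh)
    have hMget :
        ((List.range h).map (fun (r : Nat) =>
          if (((r : Int) - d) % (h : Int)).toNat < k
          then F dflt (((r : Int) - d) % (h : Int)).toNat else dflt)).getD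
          ((((k : Int) + d) % (h : Int)).toNat) e = dflt := by
      rw [List.getD_eq_getElem _ _ (by simpa using htkh)]
      simp only [List.getElem_map, List.getElem_range, hback]
      simp
    rw [hMget]
    apply List.ext_getElem
    · simp
    · intro r h1' h2'
      have hr : r < h := by simpa using h2'
      have hr0 : 0 ≤ ((r : Int) - d) % (h : Int) := Int.emod_nonneg _ (by omega)
      have hr1 : ((r : Int) - d) % (h : Int) < (h : Int) := Int.emod_lt_of_pos _ hposZ
      simp only [List.getElem_set, List.getElem_map, List.getElem_range]
      by_cases hcase : (((k : Int) + d) % (h : Int)).toNat = r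
      · subst hcase
        rw [hback]
        simp
      · have hne : (((r : Int) - d) % (h : Int)).toNat ≠ k := by
          intro heq
          apply hcase
          have heqZ : ((r : Int) - d) % (h : Int) = (k : Int) := by omega
          have := pv_mod_inj (r : Int) d (h : Int) (by omega) (by exact_mod_cast hr)
          rw [heqZ] at this
          omega
        rw [if_neg hcase]
        have : ((((r : Int) - d) % (h : Int)).toNat < k + 1) ↔
            ((((r : Int) - d) % (h : Int)).toNat < k) := by omega
        simp only [this]

-- the common gather form both ports are reduced to (w > 0)
def pvGather (md : List (List String)) (dx dy : Int) (h w : Nat) : List (List String) :=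
  (List.range h).map (fun (r : Nat) =>
    (List.range w).map (fun (c : Nat) =>
      (md.getD (((r : Int) - dy) % (h : Int)).toNat []).getD (((c : Int) - dx) % (w : Int)).toNat ""))

-- A's nested scatter loops compute the gather form
theorem pv_Afold (md : List (List String)) (dx dy : Int) (h w : Nat)
    (hH : 0 < h) (hW : 0 < w) :
    (List.range h).foldl (fun nm (y : Nat) =>
        (List.range w).foldl (fun nm2 (x : Nat) =>
          nm2.set (((y : Int) + dy) % (h : Int)).toNat
            ((nm2.getD (((y : Int) + dy) % (h : Int)).toNat []).set
              (((x : Int) + dx) % (w : Int)).toNat ((md.getD y []).getD x ""))) nm)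
      (List.replicate h (List.replicate w ""))
    = pvGather md dx dy h w := by
  have hHZ : (0 : Int) < (h : Int) := by exact_mod_cast hH
  have hWZ : (0 : Int) < (w : Int) := by exact_mod_cast hW
  have hcongr := pv_foldl_congr_inv (fun nm => nm.length = h)
    (fun nm (y : Nat) =>
      (List.range w).foldl (fun nm2 (x : Nat) =>
        nm2.set (((y : Int) + dy) % (h : Int)).toNat
          ((nm2.getD (((y : Int) + dy) % (h : Int)).toNat []).set
            (((x : Int) + dx) % (w : Int)).toNat ((md.getD y []).getD x ""))) nm)
    (fun nm (y : Nat) =>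
      nm.set (((y : Int) + dy) % (h : Int)).toNat
        ((List.range w).foldl (fun (b : List String) (x : Nat) =>
            b.set (((x : Int) + dx) % (w : Int)).toNat ((md.getD y []).getD x ""))
          (nm.getD (((y : Int) + dy) % (h : Int)).toNat [])))
    (by intro a b ha; simpa using ha)
    (by
      intro a y ha
      have hlt : (((y : Int) + dy) % (h : Int)).toNat < a.length := by
        have h0 : 0 ≤ ((y : Int) + dy) % (h : Int) := Int.emod_nonneg _ (by omega)
        have h1 : ((y : Int) + dy) % (h : Int) < (h : Int) := Int.emod_lt_of_pos _ hHZ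
        omega
      exact pv_foldl_set_row
        (fun (b : List String) (x : Nat) =>
          b.set (((x : Int) + dx) % (w : Int)).toNat ((md.getD y []).getD x ""))
        (((y : Int) + dy) % (h : Int)).toNat [] (List.range w) a hlt)
    (List.range h) (List.replicate h (List.replicate w "")) (by simp)
  refine hcongr.trans ?_
  have hsc := pv_scatter h hH dy (List.replicate w "") []
    (fun (a : List String) (y : Nat) =>
      (List.range w).foldl (fun (b : List String) (x : Nat) =>
        b.set (((x : Int) + dx) % (w : Int)).toNat ((md.getD y []).getD x "")) a)
    h le_rfl
  refine hsc.trans ?_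
  unfold pvGather
  apply List.map_congr_left
  intro r hr
  rw [List.mem_range] at hr
  have h0 : 0 ≤ ((r : Int) - dy) % (h : Int) := Int.emod_nonneg _ (by omega)
  have h1 : ((r : Int) - dy) % (h : Int) < (h : Int) := Int.emod_lt_of_pos _ hHZ
  rw [if_pos (by omega : (((r : Int) - dy) % (h : Int)).toNat < h)]
  have hsc2 := pv_scatter w hW dx "" ""
    (fun (_ : String) (x : Nat) =>
      (md.getD (((r : Int) - dy) % (h : Int)).toNat []).getD x "") w le_rfl
  refine hsc2.trans ?_
  apply List.map_congr_left
  intro c hc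
  rw [List.mem_range] at hc
  have h0c : 0 ≤ ((c : Int) - dx) % (w : Int) := Int.emod_nonneg _ (by omega)
  have h1c : ((c : Int) - dx) % (w : Int) < (w : Int) := Int.emod_lt_of_pos _ hWZ
  rw [if_pos (by omega : (((c : Int) - dx) % (w : Int)).toNat < w)]

-- B's rotated slice (split point w - dx % w, a nonnegative bound), element by element
theorem pv_Brow (src : List String) (dx : Int) (w : Nat) (hW : 0 < w)
    (hsrc : w ≤ src.length) :
    PySem.List.slice (src.take w) (some ((w : Int) - dx % (w : Int))) none ++
      PySem.List.slice (src.take w) none (some ((w : Int) - dx % (w : Int)))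
    = (List.range w).map (fun (c : Nat) =>
        src.getD (((c : Int) - dx) % (w : Int)).toNat "") := by
  have hWZ : (0 : Int) < (w : Int) := by exact_mod_cast hW
  have h0 : 0 ≤ dx % (w : Int) := Int.emod_nonneg _ (by omega)
  have h1 : dx % (w : Int) < (w : Int) := Int.emod_lt_of_pos _ hWZ
  have hrowlen : (src.take w).length = w := by simp [Nat.min_eq_left hsrc]
  set k : Nat := (dx % (w : Int)).toNat with hk
  have hkZ : (k : Int) = dx % (w : Int) := Int.toNat_of_nonneg h0
  have hkw : k < w := by omega
  have hmod : ∀ c : Nat, c < w → ((c : Int) - dx) % (w : Int)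
      = if c < k then (c : Int) - k + w else (c : Int) - k := by
    intro c hc
    have heq : ((c : Int) - dx) % (w : Int) = ((c : Int) - dx % (w : Int)) % (w : Int) :=
      (pv_mod_sub_mod _ _ _).symm
    rw [heq, ← hkZ]
    by_cases hck : c < k
    · rw [if_pos hck]
      have h2 : ((c : Int) - k) % (w : Int) = ((c : Int) - k + w * 1) % (w : Int) := by
        rw [Int.add_mul_emod_self_left]
      rw [h2]
      have e1 : (c : Int) - k + (w : Int) * 1 = (c : Int) - k + w := by ring
      rw [e1]
      exact Int.emod_eq_of_lt (by omega) (by omega)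
    · rw [if_neg hck]
      exact Int.emod_eq_of_lt (by omega) (by omega)
  have hsplit : (w : Int) - dx % (w : Int) = (((w - k : Nat) : Int)) := by omega
  rw [hsplit, PySem.List.slice_from_natCast, PySem.List.slice_to_natCast]
  apply List.ext_getElem
  · simp only [List.length_append, List.length_drop, List.length_take,
      List.length_map, List.length_range, hrowlen]
    omega
  · intro c hc1 hc2
    have hcw : c < w := by simpa using hc2
    have hdlen : ((src.take w).drop (w - k)).length = k := by
      simp only [List.length_drop, hrowlen]; omega
    simp only [List.getElem_map, List.getElem_range]
    rw [hmod c hcw]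
    by_cases hck : c < k
    · rw [List.getElem_append_left (by omega)]
      rw [if_pos hck]
      rw [List.getElem_drop, List.getElem_take]
      rw [List.getD_eq_getElem _ _ (by omega : ((c : Int) - k + w).toNat < src.length)]
      congr 1
      omega
    · rw [List.getElem_append_right (by omega)]
      rw [if_neg hck]
      simp only [hdlen, List.getElem_take]
      rw [List.getD_eq_getElem _ _ (by omega : ((c : Int) - k).toNat < src.length)]
      congr 1
      omega

-- ===== VERDICT (by name: the statement is the Claim_ definition above) =====
theorem shift_map_spec : Claim_equal_shift_map := by
  intro md dx dy _ hP
  obtain ⟨hne, hrows⟩ := hP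
  cases md with
  | nil => exact absurd rfl hne
  | cons row0 rest =>
    simp only [List.headD_cons] at hrows
    have hH : 0 < (row0 :: rest).length := by simp
    have hHZ : (0 : Int) < ((row0 :: rest).length : Int) := by exact_mod_cast hH
    unfold Spec_shift_map
    by_cases hw : 0 < row0.length
    · -- width > 0: both ports equal the gather form
      have hWZ : (0 : Int) < ((row0.length : Nat) : Int) := by exact_mod_cast hw
      have hA : shift_map (row0 :: rest) dx dy
          = pvGather (row0 :: rest) dx dy (row0 :: rest).length row0.length := by
        show (List.range (row0 :: rest).length).foldl _ _ = _
        simp only [PySem.Int.mod_eq_emod_of_pos hHZ, PySem.Int.mod_eq_emod_of_pos hWZ]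
        exact pv_Afold (row0 :: rest) dx dy (row0 :: rest).length row0.length hH hw
      have hB : shift_map_alt (row0 :: rest) dx dy
          = pvGather (row0 :: rest) dx dy (row0 :: rest).length row0.length := by
        show (List.range (row0 :: rest).length).map _ = _
        rw [if_neg (by omega : ¬ ((row0.length : Nat) : Int) = 0)]
        simp only [PySem.Int.mod_eq_emod_of_pos hHZ, PySem.Int.mod_eq_emod_of_pos hWZ]
        unfold pvGather
        apply List.map_congr_left
        intro y hy
        rw [List.mem_range] at hy
        have hyidx : ((y : Int) - dy % ((row0 :: rest).length : Int)) % ((row0 :: rest).length : Int)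
            = ((y : Int) - dy) % ((row0 :: rest).length : Int) := pv_mod_sub_mod _ _ _
      -- reduce the source-row lookup then apply pv_Brow
        rw [hyidx]
        have h0 : 0 ≤ ((y : Int) - dy) % ((row0 :: rest).length : Int) := Int.emod_nonneg _ (by omega)
        have h1 : ((y : Int) - dy) % ((row0 :: rest).length : Int) < ((row0 :: rest).length : Int) :=
          Int.emod_lt_of_pos _ hHZ
        have hmem : ((row0 :: rest).getD (((y : Int) - dy) % ((row0 :: rest).length : Int)).toNat [])
            ∈ (row0 :: rest) := by
          rw [List.getD_eq_getElem _ _ (by omega)]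
          exact List.getElem_mem _
        have hsrc : row0.length
            ≤ ((row0 :: rest).getD (((y : Int) - dy) % ((row0 :: rest).length : Int)).toNat []).length :=
          hrows _ hmem
        have hslice : PySem.List.slice
              ((row0 :: rest).getD (((y : Int) - dy) % ((row0 :: rest).length : Int)).toNat [])
              none (some ((row0.length : Nat) : Int))
            = ((row0 :: rest).getD (((y : Int) - dy) % ((row0 :: rest).length : Int)).toNat []).take
                row0.length := PySem.List.slice_to_natCast _ _
        rw [hslice]
        exact pv_Brow _ dx row0.length hw hsrc
      rw [hA, hB]
    · -- width = 0: A fills nothing (inner loop empty), B's rows are slices of take 0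
      have hw0 : row0.length = 0 := by omega
      have hA : shift_map (row0 :: rest) dx dy
          = List.replicate (row0 :: rest).length ([] : List String) := by
        show (List.range (row0 :: rest).length).foldl _ _ = _
        rw [hw0]
        simp [List.foldl_fixed]
      have hB : shift_map_alt (row0 :: rest) dx dy
          = List.replicate (row0 :: rest).length ([] : List String) := by
        show (List.range (row0 :: rest).length).map _ = _
        rw [if_pos (by rw [hw0]; rfl : ((row0.length : Nat) : Int) = 0)]
        rw [hw0]
        apply List.ext_getElem
        · simp
        · intro i hi1 hi2
          simp only [List.getElem_map, List.getElem_range, List.getElem_replicate]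
          rw [show ((0 : Nat) : Int) - (0 : Int) = (((0 : Nat)) : Int) by norm_num]
          rw [PySem.List.slice_to_natCast]
          simp [PySem.List.slice]
      rw [hA, hB]
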